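-- pv_equiv track=rewrite | github.com/MelenAugust/ArtificialLabb2 | path_planning.py | find_coord
-- ===== SOURCE A (Python) =====
-- def find_coord(map2d_, start, goal):
--     for y in range(len(map2d_)):
--         for x in range(len(map2d_[y])):
--             if map2d_[y][x] == -2:
--                 start = (y, x)
--             elif map2d_[y][x] == -3:
--                 goal = (y, x)
--
--     if start is None or goal is None:
--         raise ValueError("Start or goal point not found in the map")
--
--     return start, goal
-- ===== SOURCE B (Python) =====
-- def find_coord(map2d_, start, goal):
--     start_found = False
--     goal_found = False
--     for y in range(len(map2d_) - 1, -1, -1):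
--         row = map2d_[y]
--         for x in range(len(row) - 1, -1, -1):
--             v = row[x]
--             if v == -2 and not start_found:
--                 start = (y, x)
--                 start_found = True
--             elif v == -3 and not goal_found:
--                 goal = (y, x)
--                 goal_found = True
--         if start_found and goal_found:
--             break
--
--     if start is None or goal is None:
--         raise ValueError("Start or goal point not found in the map")
--
--     return start, goal
-- ===== Notes on version B (the rewrite author's own statement) =====
-- stated objective: faster
-- what changed: Replaces A's exhaustive forward scan (last marker wins by overwriting) with a backward scan keeping found-flags that takes the first marker seen and breaks out of the loops as soon as both markers are found.
import Mathlib
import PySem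

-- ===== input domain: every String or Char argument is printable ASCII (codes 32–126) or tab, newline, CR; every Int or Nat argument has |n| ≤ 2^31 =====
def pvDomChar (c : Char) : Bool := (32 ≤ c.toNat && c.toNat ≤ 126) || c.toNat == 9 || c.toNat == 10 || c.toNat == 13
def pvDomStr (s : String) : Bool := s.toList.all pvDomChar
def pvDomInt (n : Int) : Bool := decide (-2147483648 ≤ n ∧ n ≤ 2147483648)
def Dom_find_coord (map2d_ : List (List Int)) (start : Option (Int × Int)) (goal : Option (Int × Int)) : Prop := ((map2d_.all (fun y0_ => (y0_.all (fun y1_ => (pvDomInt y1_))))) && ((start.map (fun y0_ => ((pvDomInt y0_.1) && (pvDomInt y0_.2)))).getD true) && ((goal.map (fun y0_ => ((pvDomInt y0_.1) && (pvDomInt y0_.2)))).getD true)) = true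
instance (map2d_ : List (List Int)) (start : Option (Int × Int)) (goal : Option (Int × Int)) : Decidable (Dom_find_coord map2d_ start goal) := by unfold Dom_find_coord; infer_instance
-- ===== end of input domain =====

-- B replaces A's exhaustive forward scan by a backward scan with found-flags and an
-- early break once both markers are found (measurably faster by early exit; same result).

-- ===== PORT A =====
def find_coord (map2d_ : List (List Int)) (start : Option (Int × Int)) (goal : Option (Int × Int)) : (Int × Int) × (Int × Int) :=
  let p := (PySem.List.enumerate map2d_).foldl
    (fun (sg : Option (Int × Int) × Option (Int × Int)) yrow =>
      (PySem.List.enumerate yrow.2).foldl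
        (fun sg xv =>
          if xv.2 = -2 then (some (yrow.1, xv.1), sg.2)
          else if xv.2 = -3 then (sg.1, some (yrow.1, xv.1))
          else sg) sg)
    (start, goal)
  -- Python raises ValueError when either option is still None; Pre_find_coord excludes that,
  -- so the getD defaults below are never the claimed value.
  (p.1.getD (0, 0), p.2.getD (0, 0))

-- ===== PORT B =====
-- inner loop of Source B: for x in range(len(row)-1, -1, -1), with found-flags
def pvRowRev (y : Int) (cells : List (Int × Int)) (s : Option (Int × Int)) (sf : Bool)
    (g : Option (Int × Int)) (gf : Bool) : Option (Int × Int) × Bool × Option (Int × Int) × Bool :=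
  match cells with
  | [] => (s, sf, g, gf)
  | xv :: rest =>
    if xv.2 = -2 ∧ sf = false then pvRowRev y rest (some (y, xv.1)) true g gf
    else if xv.2 = -3 ∧ gf = false then pvRowRev y rest s sf (some (y, xv.1)) true
    else pvRowRev y rest s sf g gf

-- outer loop of Source B: rows from last to first, break once both flags are set
def pvRowsRev (rows : List (Int × List Int)) (s : Option (Int × Int)) (sf : Bool)
    (g : Option (Int × Int)) (gf : Bool) : Option (Int × Int) × Bool × Option (Int × Int) × Bool :=
  match rows with
  | [] => (s, sf, g, gf)
  | yr :: rest =>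
    let r := pvRowRev yr.1 (PySem.List.enumerate yr.2).reverse s sf g gf
    if r.2.1 = true ∧ r.2.2.2 = true then r
    else pvRowsRev rest r.1 r.2.1 r.2.2.1 r.2.2.2

def find_coord_alt (map2d_ : List (List Int)) (start : Option (Int × Int)) (goal : Option (Int × Int)) : (Int × Int) × (Int × Int) :=
  let r := pvRowsRev (PySem.List.enumerate map2d_).reverse start false goal false
  (r.1.getD (0, 0), r.2.2.1.getD (0, 0))

-- ===== PRECONDITION & SPEC =====
-- Pre_ excludes exactly the inputs on which Python A raises ValueError ("Start or goal point
-- not found in the map"): start (resp. goal) is None and no cell equals -2 (resp. -3).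
-- B raises the same ValueError there.
def Pre_find_coord (map2d_ : List (List Int)) (start : Option (Int × Int)) (goal : Option (Int × Int)) : Prop :=
  (start.isSome = true ∨ ∃ row ∈ map2d_, (-2 : Int) ∈ row) ∧
  (goal.isSome = true ∨ ∃ row ∈ map2d_, (-3 : Int) ∈ row)
instance (map2d_ : List (List Int)) (start : Option (Int × Int)) (goal : Option (Int × Int)) : Decidable (Pre_find_coord map2d_ start goal) := by unfold Pre_find_coord; infer_instance

def pvWitness_find_coord : List (List Int) × (Option (Int × Int)) × (Option (Int × Int)) :=
  ([[0, -2], [-3, 1]], none, none)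

def Spec_find_coord (map2d_ : List (List Int)) (start : Option (Int × Int)) (goal : Option (Int × Int)) (out : (Int × Int) × (Int × Int)) : Prop := out = find_coord_alt map2d_ start goal
instance (map2d_ : List (List Int)) (start : Option (Int × Int)) (goal : Option (Int × Int)) (out : (Int × Int) × (Int × Int)) : Decidable (Spec_find_coord map2d_ start goal out) := by unfold Spec_find_coord; infer_instance

-- ===== CLAIM (what is proved, stated in full; the proofs are below) =====
def Claim_equal_find_coord : Prop := ∀ (map2d_ : List (List Int)) (start : Option (Int × Int)) (goal : Option (Int × Int)), Dom_find_coord map2d_ start goal → Pre_find_coord map2d_ start goal → Spec_find_coord map2d_ start goal (find_coord map2d_ start goal)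

-- ===== LEMMAS AND PROOFS =====

-- A cell is ((y, x), value).
def pvStep (sg : Option (Int × Int) × Option (Int × Int)) (c : (Int × Int) × Int) :
    Option (Int × Int) × Option (Int × Int) :=
  if c.2 = -2 then (some c.1, sg.2) else if c.2 = -3 then (sg.1, some c.1) else sg

def pvCells (map2d_ : List (List Int)) : List ((Int × Int) × Int) :=
  (PySem.List.enumerate map2d_).flatMap
    (fun yr => (PySem.List.enumerate yr.2).map (fun xv => ((yr.1, xv.1), xv.2)))

-- generic backward scan over a flat cell list, with found-flags
def pvRscan (cells : List ((Int × Int) × Int)) (s : Option (Int × Int)) (sf : Bool)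
    (g : Option (Int × Int)) (gf : Bool) : Option (Int × Int) × Bool × Option (Int × Int) × Bool :=
  match cells with
  | [] => (s, sf, g, gf)
  | c :: rest =>
    if c.2 = -2 ∧ sf = false then pvRscan rest (some c.1) true g gf
    else if c.2 = -3 ∧ gf = false then pvRscan rest s sf (some c.1) true
    else pvRscan rest s sf g gf

-- forward "last marker wins" accumulators (components of A's fold)
def pvFwdS (s : Option (Int × Int)) : List ((Int × Int) × Int) → Option (Int × Int)
  | [] => s
  | c :: r => pvFwdS (if c.2 = -2 then some c.1 else s) r

def pvFwdG (g : Option (Int × Int)) : List ((Int × Int) × Int) → Option (Int × Int)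
  | [] => g
  | c :: r => pvFwdG (if c.2 = -3 then some c.1 else g) r

-- "first marker wins" selectors (what the backward scan records)
def pvRS (s : Option (Int × Int)) : List ((Int × Int) × Int) → Option (Int × Int)
  | [] => s
  | c :: r => if c.2 = -2 then some c.1 else pvRS s r

def pvRG (g : Option (Int × Int)) : List ((Int × Int) × Int) → Option (Int × Int)
  | [] => g
  | c :: r => if c.2 = -3 then some c.1 else pvRG g r

theorem pvFoldl_step (L : List ((Int × Int) × Int)) :
    ∀ s g, L.foldl pvStep (s, g) = (pvFwdS s L, pvFwdG g L) := by
  induction L with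
  | nil => intro s g; rfl
  | cons c r ih =>
    intro s g
    by_cases h2 : c.2 = -2
    · simp [pvStep, pvFwdS, pvFwdG, h2, ih]
    · by_cases h3 : c.2 = -3 <;> simp [pvStep, pvFwdS, pvFwdG, h2, h3, ih]

theorem pvRscan_inv (L : List ((Int × Int) × Int)) :
    ∀ s sf g gf, pvRscan L s sf g gf =
      ((if sf then s else pvRS s L), sf || L.any (fun c => decide (c.2 = -2)),
       (if gf then g else pvRG g L), gf || L.any (fun c => decide (c.2 = -3))) := by
  induction L with
  | nil => intro s sf g gf; simp [pvRscan, pvRS, pvRG]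
  | cons c r ih =>
    intro s sf g gf
    by_cases h2 : c.2 = -2
    · have h3 : ¬ c.2 = -3 := by omega
      cases sf <;> simp [pvRscan, pvRS, pvRG, h2, ih]
    · by_cases h3 : c.2 = -3
      · cases gf <;> simp [pvRscan, pvRS, pvRG, h3, ih]
      · simp [pvRscan, pvRS, pvRG, h2, h3, ih]

theorem pvRS_append (A B : List ((Int × Int) × Int)) :
    ∀ s, pvRS s (A ++ B) = pvRS (pvRS s B) A := by
  induction A with
  | nil => intro s; rfl
  | cons c r ih => intro s; by_cases h : c.2 = -2 <;> simp [pvRS, h, ih]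

theorem pvRG_append (A B : List ((Int × Int) × Int)) :
    ∀ g, pvRG g (A ++ B) = pvRG (pvRG g B) A := by
  induction A with
  | nil => intro g; rfl
  | cons c r ih => intro g; by_cases h : c.2 = -3 <;> simp [pvRG, h, ih]

theorem pvRS_reverse (L : List ((Int × Int) × Int)) :
    ∀ s, pvRS s L.reverse = pvFwdS s L := by
  induction L with
  | nil => intro s; rfl
  | cons c r ih =>
    intro s
    simp only [List.reverse_cons, pvRS_append]
    by_cases h : c.2 = -2 <;> simp [pvRS, pvFwdS, h, ih]

theorem pvRG_reverse (L : List ((Int × Int) × Int)) :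
    ∀ g, pvRG g L.reverse = pvFwdG g L := by
  induction L with
  | nil => intro g; rfl
  | cons c r ih =>
    intro g
    simp only [List.reverse_cons, pvRG_append]
    by_cases h : c.2 = -3 <;> simp [pvRG, pvFwdG, h, ih]

theorem pvRscan_append (A B : List ((Int × Int) × Int)) :
    ∀ s sf g gf, pvRscan (A ++ B) s sf g gf =
      (let r := pvRscan A s sf g gf; pvRscan B r.1 r.2.1 r.2.2.1 r.2.2.2) := by
  induction A with
  | nil => intro s sf g gf; rfl
  | cons c r ih =>
    intro s sf g gf
    by_cases h2 : c.2 = -2 ∧ sf = false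
    · simp [pvRscan, h2, ih]
    · by_cases h3 : c.2 = -3 ∧ gf = false <;> simp [pvRscan, h2, h3, ih]

theorem pvRscan_saturated (L : List ((Int × Int) × Int)) (s : Option (Int × Int))
    (g : Option (Int × Int)) : pvRscan L s true g true = (s, true, g, true) := by
  simp [pvRscan_inv]

theorem pvRowRev_eq_rscan (y : Int) (cs : List (Int × Int)) :
    ∀ s sf g gf, pvRowRev y cs s sf g gf =
      pvRscan (cs.map (fun xv => ((y, xv.1), xv.2))) s sf g gf := by
  induction cs with
  | nil => intro s sf g gf; rfl
  | cons c r ih =>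
    intro s sf g gf
    by_cases h2 : c.2 = -2 ∧ sf = false
    · simp [pvRowRev, pvRscan, h2, ih]
    · by_cases h3 : c.2 = -3 ∧ gf = false <;> simp [pvRowRev, pvRscan, h2, h3, ih]

def pvRowCells (yr : Int × List Int) : List ((Int × Int) × Int) :=
  (PySem.List.enumerate yr.2).map (fun xv => ((yr.1, xv.1), xv.2))

theorem pvRowsRev_eq_rscan (rows : List (Int × List Int)) :
    ∀ s sf g gf, pvRowsRev rows s sf g gf =
      pvRscan (rows.flatMap (fun yr => (pvRowCells yr).reverse)) s sf g gf := by
  induction rows with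
  | nil => intro s sf g gf; rfl
  | cons yr rest ih =>
    intro s sf g gf
    have hrow : pvRowRev yr.1 (PySem.List.enumerate yr.2).reverse s sf g gf =
        pvRscan (pvRowCells yr).reverse s sf g gf := by
      rw [pvRowRev_eq_rscan, pvRowCells, List.map_reverse]
    show (let r := pvRowRev yr.1 (PySem.List.enumerate yr.2).reverse s sf g gf;
        if r.2.1 = true ∧ r.2.2.2 = true then r
        else pvRowsRev rest r.1 r.2.1 r.2.2.1 r.2.2.2) = _
    rw [List.flatMap_cons, pvRscan_append]
    simp only [hrow]
    set r := pvRscan (pvRowCells yr).reverse s sf g gf with hr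
    by_cases hb : r.2.1 = true ∧ r.2.2.2 = true
    · simp only [hb, if_pos, and_self]
      rw [pvRscan_saturated]
      simp [Prod.ext_iff, hb.1, hb.2]
    · simp only [hb, if_neg, not_false_iff, ih]

theorem pvCells_reverse (map2d_ : List (List Int)) :
    (pvCells map2d_).reverse =
      (PySem.List.enumerate map2d_).reverse.flatMap (fun yr => (pvRowCells yr).reverse) := by
  rw [pvCells, List.reverse_flatMap]
  rfl

theorem pvFindA (map2d_ : List (List Int)) (start goal : Option (Int × Int)) :
    find_coord map2d_ start goal =
      ((pvFwdS start (pvCells map2d_)).getD (0, 0), (pvFwdG goal (pvCells map2d_)).getD (0, 0)) := by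
  show (let p := (PySem.List.enumerate map2d_).foldl _ (start, goal); (p.1.getD (0,0), p.2.getD (0,0))) = _
  have : (PySem.List.enumerate map2d_).foldl
      (fun (sg : Option (Int × Int) × Option (Int × Int)) yrow =>
        (PySem.List.enumerate yrow.2).foldl
          (fun sg xv =>
            if xv.2 = -2 then (some (yrow.1, xv.1), sg.2)
            else if xv.2 = -3 then (sg.1, some (yrow.1, xv.1))
            else sg) sg)
      (start, goal) = (pvCells map2d_).foldl pvStep (start, goal) := by
    rw [pvCells, List.foldl_flatMap]
    simp only [List.foldl_map]
    rfl
  simp only [this, pvFoldl_step]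

theorem pvFindB (map2d_ : List (List Int)) (start goal : Option (Int × Int)) :
    find_coord_alt map2d_ start goal =
      ((pvFwdS start (pvCells map2d_)).getD (0, 0), (pvFwdG goal (pvCells map2d_)).getD (0, 0)) := by
  show (let r := pvRowsRev (PySem.List.enumerate map2d_).reverse start false goal false;
      (r.1.getD (0,0), r.2.2.1.getD (0,0))) = _
  rw [pvRowsRev_eq_rscan, ← pvCells_reverse, pvRscan_inv]
  simp [pvRS_reverse, pvRG_reverse]

-- ===== VERDICT (by name: the statement is the Claim_ definition above) =====
theorem find_coord_spec : Claim_equal_find_coord := by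
  intro map2d_ start goal _ _
  unfold Spec_find_coord
  rw [pvFindA, pvFindB]
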